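-- pv_equiv track=rewrite | github.com/ashboi005/flask-auto-certificate-mailer | blueprints/bulk_email/template_utils.py | map_csv_to_template_variables
-- ===== SOURCE A (Python) =====
-- def map_csv_to_template_variables(csv_columns, template_variables):
--     """Help map CSV columns to template variables"""
--     # Automatic mapping suggestions
--     mapping_suggestions = {}
--
--     csv_lower = [col.lower() for col in csv_columns]
--
--     for var in template_variables:
--         var_lower = var.lower()
--
--         # Try to find exact matches first
--         if var_lower in csv_lower:
--             mapping_suggestions[var] = csv_columns[csv_lower.index(var_lower)]
--         # Try partial matches
--         elif 'name' in var_lower: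
--             name_cols = [col for col in csv_columns if 'name' in col.lower()]
--             if name_cols:
--                 mapping_suggestions[var] = name_cols[0]
--         elif 'email' in var_lower:
--             email_cols = [col for col in csv_columns if 'email' in col.lower()]
--             if email_cols:
--                 mapping_suggestions[var] = email_cols[0]
--         elif 'time' in var_lower or 'slot' in var_lower:
--             time_cols = [col for col in csv_columns if any(word in col.lower() for word in ['time', 'slot', 'schedule'])]
--             if time_cols:
--                 mapping_suggestions[var] = time_cols[0]
--         elif 'meet' in var_lower or 'link' in var_lower:
--             link_cols = [col for col in csv_columns if any(word in col.lower() for word in ['link', 'meet', 'zoom', 'url'])]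
--             if link_cols:
--                 mapping_suggestions[var] = link_cols[0]
--
--     return mapping_suggestions
-- ===== SOURCE B (Python) =====
-- def map_csv_to_template_variables(csv_columns, template_variables):
--     """Help map CSV columns to template variables (single preprocessing pass + O(1) lookups)."""
--     # One pass over the columns: exact index (first occurrence per lowered name)
--     # and one representative column per keyword bucket.
--     exact = {}
--     rep_name = rep_email = rep_time = rep_link = None
--     for col in csv_columns:
--         low = col.lower()
--         if low not in exact:
--             exact[low] = col
--         if rep_name is None and 'name' in low:
--             rep_name = col
--         if rep_email is None and 'email' in low:
--             rep_email = col
--         if rep_time is None and ('time' in low or 'slot' in low or 'schedule' in low):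
--             rep_time = col
--         if rep_link is None and ('link' in low or 'meet' in low or 'zoom' in low or 'url' in low):
--             rep_link = col
--     out = {}
--     for var in template_variables:
--         vl = var.lower()
--         if vl in exact:
--             out[var] = exact[vl]
--         else:
--             if 'name' in vl:
--                 rep = rep_name
--             elif 'email' in vl:
--                 rep = rep_email
--             elif 'time' in vl or 'slot' in vl:
--                 rep = rep_time
--             elif 'meet' in vl or 'link' in vl:
--                 rep = rep_link
--             else:
--                 rep = None
--             if rep is not None:
--                 out[var] = rep
--     return out
-- ===== Notes on version B (the rewrite author's own statement) =====
-- stated objective: faster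
-- what changed: One preprocessing pass over csv_columns builds an exact lowered-name index and one first-occurrence representative per keyword bucket, so each template variable is resolved by O(1) lookup instead of re-scanning csv_columns (membership test, .index, and a filtering comprehension per variable).
import Mathlib
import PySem

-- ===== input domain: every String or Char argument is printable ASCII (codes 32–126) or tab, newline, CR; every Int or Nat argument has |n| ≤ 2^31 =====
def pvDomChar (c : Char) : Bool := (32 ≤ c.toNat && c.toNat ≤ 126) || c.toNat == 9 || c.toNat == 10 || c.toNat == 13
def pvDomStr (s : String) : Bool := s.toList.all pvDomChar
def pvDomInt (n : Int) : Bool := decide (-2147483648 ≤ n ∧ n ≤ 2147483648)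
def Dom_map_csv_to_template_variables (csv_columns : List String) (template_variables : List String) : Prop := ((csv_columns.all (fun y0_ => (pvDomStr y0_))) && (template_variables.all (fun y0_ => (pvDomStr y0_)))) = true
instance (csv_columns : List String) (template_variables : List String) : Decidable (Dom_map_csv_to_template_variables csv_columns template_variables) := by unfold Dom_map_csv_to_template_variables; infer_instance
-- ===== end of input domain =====

-- B replaces A's per-variable scans of csv_columns by one preprocessing pass building an
-- exact lowered-name index and a first representative per keyword bucket (objective: faster lookups).

-- ===== PORT A =====
def map_csv_to_template_variables (csv_columns : List String) (template_variables : List String) : List (String × String) :=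
  let csv_lower := csv_columns.map PySem.Str.lower
  let d := template_variables.foldl (fun (ms : PySem.Dict String String) var =>
    let var_lower := PySem.Str.lower var
    if csv_lower.contains var_lower then
      -- csv_columns[csv_lower.index(var_lower)] : index exists and is in range, so bind succeeds
      match (PySem.List.index? csv_lower var_lower).bind
              (fun i => PySem.List.pyGet? csv_columns (i : Int)) with
      | some c => ms.insert var c
      | none => ms
    else if PySem.Str.isIn "name" var_lower then
      match csv_columns.filter (fun col => PySem.Str.isIn "name" (PySem.Str.lower col)) with
      | [] => ms
      | c :: _ => ms.insert var c
    else if PySem.Str.isIn "email" var_lower then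
      match csv_columns.filter (fun col => PySem.Str.isIn "email" (PySem.Str.lower col)) with
      | [] => ms
      | c :: _ => ms.insert var c
    else if PySem.Str.isIn "time" var_lower || PySem.Str.isIn "slot" var_lower then
      match csv_columns.filter (fun col =>
          (["time", "slot", "schedule"]).any (fun w => PySem.Str.isIn w (PySem.Str.lower col))) with
      | [] => ms
      | c :: _ => ms.insert var c
    else if PySem.Str.isIn "meet" var_lower || PySem.Str.isIn "link" var_lower then
      match csv_columns.filter (fun col =>
          (["link", "meet", "zoom", "url"]).any (fun w => PySem.Str.isIn w (PySem.Str.lower col))) with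
      | [] => ms
      | c :: _ => ms.insert var c
    else ms) PySem.Dict.empty
  d.items

-- ===== PORT B =====
-- the single preprocessing pass: exact lowered-name index + first representative per keyword bucket
def pvBuildStep (s : PySem.Dict String String × Option String × Option String × Option String × Option String)
    (col : String) : PySem.Dict String String × Option String × Option String × Option String × Option String :=
  let low := PySem.Str.lower col
  ((if s.1.contains low then s.1 else s.1.insert low col),
   (if s.2.1.isNone && PySem.Str.isIn "name" low then some col else s.2.1),
   (if s.2.2.1.isNone && PySem.Str.isIn "email" low then some col else s.2.2.1),
   (if s.2.2.2.1.isNone && (PySem.Str.isIn "time" low || PySem.Str.isIn "slot" low || PySem.Str.isIn "schedule" low) then some col else s.2.2.2.1),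
   (if s.2.2.2.2.isNone && (PySem.Str.isIn "link" low || PySem.Str.isIn "meet" low || PySem.Str.isIn "zoom" low || PySem.Str.isIn "url" low) then some col else s.2.2.2.2))

def map_csv_to_template_variables_alt (csv_columns : List String) (template_variables : List String) : List (String × String) :=
  let idx := csv_columns.foldl pvBuildStep (PySem.Dict.empty, none, none, none, none)
  let out := template_variables.foldl (fun (out : PySem.Dict String String) var =>
    let vl := PySem.Str.lower var
    match idx.1.get? vl with
    | some c => out.insert var c
    | none =>
      match (if PySem.Str.isIn "name" vl then idx.2.1
             else if PySem.Str.isIn "email" vl then idx.2.2.1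
             else if PySem.Str.isIn "time" vl || PySem.Str.isIn "slot" vl then idx.2.2.2.1
             else if PySem.Str.isIn "meet" vl || PySem.Str.isIn "link" vl then idx.2.2.2.2
             else none) with
      | some c => out.insert var c
      | none => out) PySem.Dict.empty
  out.items

-- ===== PRECONDITION & SPEC =====
def Spec_map_csv_to_template_variables (csv_columns : List String) (template_variables : List String) (out : List (String × String)) : Prop := out = map_csv_to_template_variables_alt csv_columns template_variables
instance (csv_columns : List String) (template_variables : List String) (out : List (String × String)) : Decidable (Spec_map_csv_to_template_variables csv_columns template_variables out) := by unfold Spec_map_csv_to_template_variables; infer_instance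

-- ===== CLAIM (what is proved, stated in full; the proofs are below) =====
def Claim_equal_map_csv_to_template_variables : Prop := ∀ (csv_columns : List String) (template_variables : List String), Dom_map_csv_to_template_variables csv_columns template_variables → Spec_map_csv_to_template_variables csv_columns template_variables (map_csv_to_template_variables csv_columns template_variables)

-- ===== LEMMAS AND PROOFS =====

-- componentwise closed forms of the preprocessing fold
def pvExactStep (e : PySem.Dict String String) (col : String) : PySem.Dict String String :=
  if e.contains (PySem.Str.lower col) then e else e.insert (PySem.Str.lower col) col

def pvRepStep (p : String → Bool) (o : Option String) (col : String) : Option String :=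
  if o.isNone && p (PySem.Str.lower col) then some col else o

theorem pvBuild_components (cols : List String)
    (s : PySem.Dict String String × Option String × Option String × Option String × Option String) :
    cols.foldl pvBuildStep s =
      (cols.foldl pvExactStep s.1,
       cols.foldl (pvRepStep (fun l => PySem.Str.isIn "name" l)) s.2.1,
       cols.foldl (pvRepStep (fun l => PySem.Str.isIn "email" l)) s.2.2.1,
       cols.foldl (pvRepStep (fun l => PySem.Str.isIn "time" l || PySem.Str.isIn "slot" l || PySem.Str.isIn "schedule" l)) s.2.2.2.1,
       cols.foldl (pvRepStep (fun l => PySem.Str.isIn "link" l || PySem.Str.isIn "meet" l || PySem.Str.isIn "zoom" l || PySem.Str.isIn "url" l)) s.2.2.2.2) := by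
  induction cols generalizing s with
  | nil => rfl
  | cons c t ih =>
    simp only [List.foldl_cons]
    rw [ih]
    rfl

-- the rep fold computes (first already-found) <|> (first matching column)
theorem pvRep_closed (p : String → Bool) (cols : List String) (r : Option String) :
    cols.foldl (pvRepStep p) r =
      r.orElse (fun _ => (cols.filter (fun col => p (PySem.Str.lower col))).head?) := by
  induction cols generalizing r with
  | nil => cases r <;> rfl
  | cons c t ih =>
    simp only [List.foldl_cons, List.filter_cons]
    cases r with
    | some a => simp [pvRepStep, ih]
    | none =>
      by_cases hp : p (PySem.Str.lower c)
      · simp [pvRepStep, hp, ih]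
      · simp [pvRepStep, hp, ih]

-- the exact-index fold answers the same lookup as csv_columns[csv_lower.index(key)]
theorem pvExact_closed (cols : List String) (e : PySem.Dict String String) (key : String) :
    (cols.foldl pvExactStep e).get? key =
      (e.get? key).orElse (fun _ =>
        (PySem.List.index? (cols.map PySem.Str.lower) key).bind
          (fun i => PySem.List.pyGet? cols (i : Int))) := by
  induction cols generalizing e with
  | nil => cases h : e.get? key <;> simp [PySem.List.index?, h]
  | cons c t ih =>
    simp only [List.foldl_cons, List.map_cons]
    rw [ih]
    by_cases hk : PySem.Str.lower c = key
    · subst hk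
      rw [PySem.List.index?_cons_self]
      have h0 : PySem.List.pyGet? (c :: t) ((0 : Nat) : Int) = some c := by
        simp
      simp only [Option.bind_some] at *
      by_cases hc : e.contains (PySem.Str.lower c)
      · have : (e.get? (PySem.Str.lower c)).isSome := by
          rw [← PySem.Dict.contains_eq_isSome_get?]; exact hc
        simp only [pvExactStep, hc, if_true]
        cases h : e.get? (PySem.Str.lower c) with
        | none => rw [h] at this; simp at this
        | some v => simp
      · simp only [pvExactStep, hc]
        have hnone : e.get? (PySem.Str.lower c) = none := by
          rw [PySem.Dict.get?_eq_none_iff_contains]; simp [hc]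
        simp [PySem.Dict.get?_insert_self, hnone]
    · rw [PySem.List.index?_cons_of_ne _ hk]
      have hstep : (pvExactStep e c).get? key = e.get? key := by
        simp only [pvExactStep]
        split
        · rfl
        · exact PySem.Dict.get?_insert_of_ne _ _ (Ne.symm hk)
      rw [hstep]
      congr 1
      funext _
      cases h : PySem.List.index? (t.map PySem.Str.lower) key with
      | none => simp
      | some i =>
        simp only [Option.map_some, Option.bind_some]
        have : PySem.List.pyGet? (c :: t) (((i + 1 : Nat)) : Int) = PySem.List.pyGet? t (i : Int) := by
          push_cast
          exact PySem.List.pyGet?_cons_succ ..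
        simpa using this

-- contains on the lowered list = the exact lookup succeeding
theorem pvContains_iff (cols : List String) (key : String) :
    (cols.map PySem.Str.lower).contains key =
      ((PySem.List.index? (cols.map PySem.Str.lower) key).bind
        (fun i => PySem.List.pyGet? cols (i : Int))).isSome := by
  cases h : PySem.List.index? (cols.map PySem.Str.lower) key with
  | none =>
    have : key ∉ cols.map PySem.Str.lower := (PySem.List.index?_eq_none_iff _ _).mp h
    simp [this]
  | some i =>
    have hmem : key ∈ cols.map PySem.Str.lower :=
      (PySem.List.index?_isSome_iff _ _).mp (by rw [h]; rfl)
    obtain ⟨hk, _, _⟩ := PySem.List.getElem_of_index?_eq_some h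
    have hlen : i < cols.length := by simp at hk; exact hk
    simp only [Option.bind_some]
    rw [PySem.List.pyGet?_natCast]
    simp [hmem, List.getElem?_eq_getElem hlen]

-- ===== VERDICT (by name: the statement is the Claim_ definition above) =====
theorem map_csv_to_template_variables_spec : Claim_equal_map_csv_to_template_variables := by
  intro cols tvars _
  unfold Spec_map_csv_to_template_variables
  simp only [map_csv_to_template_variables, map_csv_to_template_variables_alt]
  rw [pvBuild_components]
  refine congrArg PySem.Dict.items (PySem.List.foldl_congr_mem _ _ _ _ ?_)
  intro ms var _
  simp only [pvExact_closed, pvRep_closed, PySem.Dict.get?_empty, Option.orElse,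
    List.any_cons, List.any_nil, Bool.or_false, Bool.or_assoc]
  rw [pvContains_iff cols (PySem.Str.lower var)]
  cases h : (PySem.List.index? (cols.map PySem.Str.lower) (PySem.Str.lower var)).bind
      (fun i => PySem.List.pyGet? cols (i : Int)) with
  | some c => rfl
  | none =>
    simp only [Option.isSome_none, Bool.false_eq_true, if_false]
    split_ifs
    · cases List.filter (fun col => PySem.Str.isIn "name" (PySem.Str.lower col)) cols <;> rfl
    · cases List.filter (fun col => PySem.Str.isIn "email" (PySem.Str.lower col)) cols <;> rfl
    · cases List.filter (fun col => PySem.Str.isIn "time" (PySem.Str.lower col) ||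
        (PySem.Str.isIn "slot" (PySem.Str.lower col) || PySem.Str.isIn "schedule" (PySem.Str.lower col))) cols <;> rfl
    · cases List.filter (fun col => PySem.Str.isIn "link" (PySem.Str.lower col) ||
        (PySem.Str.isIn "meet" (PySem.Str.lower col) || (PySem.Str.isIn "zoom" (PySem.Str.lower col) ||
        PySem.Str.isIn "url" (PySem.Str.lower col)))) cols <;> rfl
    · rfl
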